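-- pv_equiv track=rewrite | github.com/BIUBIUBIU-JIAZHOU/anonymous | Release/utils/data_utils_mix.py | get_aspect_labels
-- ===== SOURCE A (Python) =====
-- def get_aspect_labels(labels_in):
--     aspect_dict = {
--         'NULL': 1,
--         'EXPLICIT': 0,
--         'BOTH': 2,
--     }
--     aspect_labels = []
--     for ex in labels_in:
--         aspects = set([quad[0] for quad in ex])
--
--         if 'null' not in aspects:
--             label = aspect_dict['EXPLICIT']
--         else:
--             if len(aspects) == 1:
--                 label = aspect_dict['NULL']
--             else:
--                 label = aspect_dict['BOTH']
--
--         aspect_labels.append(label)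
--     return aspect_labels
-- ===== SOURCE B (Python) =====
-- def get_aspect_labels(labels_in):
--     aspect_labels = []
--     for ex in labels_in:
--         seen_null = False
--         seen_other = False
--         for quad in ex:
--             if quad[0] == 'null':
--                 seen_null = True
--             else:
--                 seen_other = True
--             if seen_null and seen_other:
--                 break
--         aspect_labels.append(0 if not seen_null else (1 if not seen_other else 2))
--     return aspect_labels
-- ===== Notes on version B (the rewrite author's own statement) =====
-- stated objective: alternative
-- what changed: Per example, replaces materializing the distinct-aspect set and testing membership plus its size by a single early-exiting scan maintaining two booleans (seen_null/seen_other) that are mapped directly to the label.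
import Mathlib
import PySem

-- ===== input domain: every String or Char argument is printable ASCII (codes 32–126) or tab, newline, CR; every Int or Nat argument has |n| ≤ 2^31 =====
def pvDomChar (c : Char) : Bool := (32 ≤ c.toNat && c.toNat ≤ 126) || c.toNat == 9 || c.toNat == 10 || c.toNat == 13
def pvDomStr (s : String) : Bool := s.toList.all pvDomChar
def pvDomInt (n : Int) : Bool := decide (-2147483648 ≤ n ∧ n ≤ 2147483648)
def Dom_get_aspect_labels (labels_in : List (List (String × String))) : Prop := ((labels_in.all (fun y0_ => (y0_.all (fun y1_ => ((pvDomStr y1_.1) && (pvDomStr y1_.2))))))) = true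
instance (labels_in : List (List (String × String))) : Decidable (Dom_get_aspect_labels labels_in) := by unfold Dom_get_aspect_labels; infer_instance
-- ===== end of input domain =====

-- B replaces A's per-example distinct-aspect set (membership + size test) by one early-exiting
-- two-boolean scan; same return value, alternative structure (no speed claim).

-- ===== PORT A =====
def get_aspect_labels (labels_in : List (List (String × String))) : List Int :=
  let aspect_dict : PySem.Dict String Int :=
    PySem.Dict.insert (PySem.Dict.insert (PySem.Dict.insert PySem.Dict.empty "NULL" 1) "EXPLICIT" 0) "BOTH" 2
  let aspect_labels : List Int :=
    labels_in.foldl (fun acc ex =>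
      let aspects : PySem.Set String := PySem.Set.ofList (ex.map (fun quad => quad.1))
      let label : Int :=
        if ¬ (PySem.Set.contains aspects "null" = true) then
          PySem.Dict.getD aspect_dict "EXPLICIT" 0
        else if PySem.Set.len aspects = 1 then
          PySem.Dict.getD aspect_dict "NULL" 0
        else
          PySem.Dict.getD aspect_dict "BOTH" 0
      acc ++ [label]) []
  aspect_labels

-- ===== PORT B =====
-- inner 'for quad in ex: … if seen_null and seen_other: break' with the two flags as state
def scanFlags : List (String × String) → Bool → Bool → Bool × Bool
  | [], seen_null, seen_other => (seen_null, seen_other)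
  | quad :: rest, seen_null, seen_other =>
    let seen_null' := if quad.1 == "null" then true else seen_null
    let seen_other' := if quad.1 == "null" then seen_other else true
    if seen_null' && seen_other' then (seen_null', seen_other')
    else scanFlags rest seen_null' seen_other'

def get_aspect_labels_alt (labels_in : List (List (String × String))) : List Int :=
  labels_in.map (fun ex =>
    let fl := scanFlags ex false false
    if !fl.1 then 0 else if !fl.2 then 1 else 2)

-- ===== PRECONDITION & SPEC =====
def Spec_get_aspect_labels (labels_in : List (List (String × String))) (out : List Int) : Prop := out = get_aspect_labels_alt labels_in
instance (labels_in : List (List (String × String))) (out : List Int) : Decidable (Spec_get_aspect_labels labels_in out) := by unfold Spec_get_aspect_labels; infer_instance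

-- ===== CLAIM (what is proved, stated in full; the proofs are below) =====
def Claim_equal_get_aspect_labels : Prop := ∀ (labels_in : List (List (String × String))), Dom_get_aspect_labels labels_in → Spec_get_aspect_labels labels_in (get_aspect_labels labels_in)

-- ===== LEMMAS AND PROOFS =====

/-- The early-exiting flag scan computes the two "any" facts. -/
lemma scanFlags_eq (l : List (String × String)) (sn so : Bool) :
    scanFlags l sn so = (sn || l.any (fun q => q.1 == "null"), so || l.any (fun q => q.1 != "null")) := by
  induction l generalizing sn so with
  | nil => simp [scanFlags]
  | cons q rest ih =>
    by_cases h : q.1 = "null"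
    · cases so <;> simp [scanFlags, h, ih, bne]
    · cases sn <;> simp [scanFlags, h, ih, bne]

/-- A nodup list of strings containing "null" whose every member is "null" has length 1. -/
lemma len_one_of_all_null (s : List String) (hnd : s.Nodup) (hmem : "null" ∈ s)
    (hall : ∀ x ∈ s, x = "null") : s.length = 1 := by
  cases s with
  | nil => simp at hmem
  | cons a rest =>
    have ha : a = "null" := hall a (by simp)
    have : rest = [] := by
      cases rest with
      | nil => rfl
      | cons b r =>
        have hb : b = "null" := hall b (by simp)
        simp [ha, hb] at hnd
    simp [this]

/-- Per-example equality of the two label computations. -/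
lemma label_eq (ex : List (String × String)) :
    (if ¬ (PySem.Set.contains (PySem.Set.ofList (ex.map (fun quad => quad.1))) "null" = true) then (0 : Int)
     else if PySem.Set.len (PySem.Set.ofList (ex.map (fun quad => quad.1))) = 1 then 1 else 2)
    = (if !(scanFlags ex false false).1 then 0 else if !(scanFlags ex false false).2 then 1 else 2) := by
  rw [scanFlags_eq]
  simp only [Bool.false_or]
  by_cases hn : "null" ∈ ex.map (fun quad => quad.1)
  · have hc : PySem.Set.contains (PySem.Set.ofList (ex.map (fun quad => quad.1))) "null" = true :=
      (PySem.Set.contains_iff _ _).mpr ((PySem.Set.mem_ofList _ _).mpr hn)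
    have hany : ex.any (fun q => q.1 == "null") = true := by
      obtain ⟨q, hq, hq1⟩ := List.mem_map.mp hn
      exact List.any_eq_true.mpr ⟨q, hq, by simp [hq1]⟩
    rw [if_neg (not_not_intro hc), hany]
    by_cases ho : ex.any (fun q => q.1 != "null") = true
    · have hlen : PySem.Set.len (PySem.Set.ofList (ex.map (fun quad => quad.1))) ≠ 1 := by
        obtain ⟨q, hq, hq1⟩ := List.any_eq_true.mp ho
        have hq1' : q.1 ≠ "null" := bne_iff_ne.mp hq1
        have hmemq : q.1 ∈ PySem.Set.ofList (ex.map (fun quad => quad.1)) :=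
          (PySem.Set.mem_ofList _ _).mpr (List.mem_map.mpr ⟨q, hq, rfl⟩)
        have hmemn : "null" ∈ PySem.Set.ofList (ex.map (fun quad => quad.1)) :=
          (PySem.Set.mem_ofList _ _).mpr hn
        intro h1
        have h1' : (PySem.Set.ofList (ex.map (fun quad => quad.1))).length = 1 := by
          have : PySem.Set.len (PySem.Set.ofList (ex.map (fun quad => quad.1)))
              = ((PySem.Set.ofList (ex.map (fun quad => quad.1))).length : Int) := rfl
          rw [this] at h1
          exact_mod_cast h1
        obtain ⟨a, hsa⟩ := List.length_eq_one_iff.mp h1'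
        rw [hsa] at hmemq hmemn
        simp at hmemq hmemn
        exact hq1' (hmemq.trans hmemn.symm)
      rw [ho, if_neg hlen]
      simp
    · have ho' : ex.any (fun q => q.1 != "null") = false := by
        rw [Bool.eq_false_iff]; exact ho
      have hallnull : ∀ x ∈ ex.map (fun quad => quad.1), x = "null" := by
        intro x hx
        obtain ⟨q, hq, hq1⟩ := List.mem_map.mp hx
        by_contra hne
        exact ho (List.any_eq_true.mpr ⟨q, hq, bne_iff_ne.mpr (by rw [hq1]; exact hne)⟩)
      have hlen : PySem.Set.len (PySem.Set.ofList (ex.map (fun quad => quad.1))) = 1 := by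
        have h1 : (PySem.Set.ofList (ex.map (fun quad => quad.1))).length = 1 :=
          len_one_of_all_null _ (PySem.Set.nodup_ofList _)
            ((PySem.Set.mem_ofList _ _).mpr hn)
            (fun x hx => hallnull x ((PySem.Set.mem_ofList _ _).mp hx))
        have : PySem.Set.len (PySem.Set.ofList (ex.map (fun quad => quad.1)))
            = ((PySem.Set.ofList (ex.map (fun quad => quad.1))).length : Int) := rfl
        rw [this, h1]; rfl
      rw [ho', if_pos hlen]
      simp
  · have hc : PySem.Set.contains (PySem.Set.ofList (ex.map (fun quad => quad.1))) "null" = false := by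
      rw [Bool.eq_false_iff]
      intro h
      exact hn ((PySem.Set.mem_ofList _ _).mp ((PySem.Set.contains_iff _ _).mp h))
    have hany : ex.any (fun q => q.1 == "null") = false := by
      rw [Bool.eq_false_iff]
      intro h
      obtain ⟨q, hq, hq1⟩ := List.any_eq_true.mp h
      exact hn (List.mem_map.mpr ⟨q, hq, by simpa using hq1⟩)
    rw [if_pos (by rw [hc]; exact Bool.false_ne_true), hany]
    simp

-- ===== VERDICT (by name: the statement is the Claim_ definition above) =====
theorem get_aspect_labels_spec : Claim_equal_get_aspect_labels := by
  intro labels_in _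
  show get_aspect_labels labels_in = get_aspect_labels_alt labels_in
  simp only [get_aspect_labels, get_aspect_labels_alt]
  rw [PySem.List.foldl_append_singleton_eq_map]
  simp only [List.nil_append]
  apply List.map_congr_left
  intro ex _
  have hE : PySem.Dict.getD (PySem.Dict.insert (PySem.Dict.insert (PySem.Dict.insert PySem.Dict.empty "NULL" 1) "EXPLICIT" 0) "BOTH" 2) "EXPLICIT" (0:Int) = 0 := by decide
  have hN : PySem.Dict.getD (PySem.Dict.insert (PySem.Dict.insert (PySem.Dict.insert PySem.Dict.empty "NULL" 1) "EXPLICIT" 0) "BOTH" 2) "NULL" (0:Int) = 1 := by decide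
  have hB : PySem.Dict.getD (PySem.Dict.insert (PySem.Dict.insert (PySem.Dict.insert PySem.Dict.empty "NULL" 1) "EXPLICIT" 0) "BOTH" 2) "BOTH" (0:Int) = 2 := by decide
  simpa only [hE, hN, hB] using label_eq ex
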